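-- pv_equiv track=rewrite | github.com/truanter/LeetCodeInPython | projection_area.py | projectionArea_1
-- ===== SOURCE A (Python) =====
-- def projectionArea_1(grid):
--     buttom = 0
--     left = 0
--     max_left = 0
--     max_front = [0]*len(grid[0])
--     for i in grid:
--         for j in range(len(i)):
--             max_left = max(i[j], max_left)
--             if i[j]:
--                 buttom += 1
--             if i[j] > max_front[j]:
--                 max_front[j] = i[j]
--         left += max_left
--         max_left = 0
--     return left + buttom + sum(max_front)
-- ===== SOURCE B (Python) =====
-- def projectionArea_1(grid):
--     top = sum(1 for row in grid for v in row if v)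
--     side = sum(max(max(row), 0) if row else 0 for row in grid)
--     width = max(map(len, grid), default=0)
--     front = sum(max([0] + [row[j] for row in grid if j < len(row)]) for j in range(width))
--     return top + side + front
-- ===== Notes on version B (the rewrite author's own statement) =====
-- stated objective: idiomatic
-- what changed: Replaced A's single fused index-threaded loop (running count, per-row max and a mutated column-max array indexed by j) with three independent aggregations: a nonzero-cell count, a sum of row maxima, and a sum of per-column maxima computed column-by-column.
import Mathlib
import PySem

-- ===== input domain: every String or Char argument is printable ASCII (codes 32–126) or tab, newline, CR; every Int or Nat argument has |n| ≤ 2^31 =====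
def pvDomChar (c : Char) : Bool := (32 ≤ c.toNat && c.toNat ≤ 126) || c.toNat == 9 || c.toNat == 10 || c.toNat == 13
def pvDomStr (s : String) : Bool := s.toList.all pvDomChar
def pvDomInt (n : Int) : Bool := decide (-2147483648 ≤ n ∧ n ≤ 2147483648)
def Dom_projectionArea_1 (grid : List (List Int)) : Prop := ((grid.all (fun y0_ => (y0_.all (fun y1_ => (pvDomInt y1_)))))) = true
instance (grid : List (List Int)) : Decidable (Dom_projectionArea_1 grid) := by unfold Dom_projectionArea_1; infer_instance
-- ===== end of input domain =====

-- B computes the three views as three separate aggregations (nonzero count, row maxima, column maxima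
-- over ragged columns) instead of A's single fused index-threaded loop; objective: idiomatic/simpler.

-- ===== PORT A =====
-- inner loop body: state (buttom, max_left, max_front), j the column index
def innerStep (i : List Int) (st : Int × Int × List Int) (j : Nat) : Int × Int × List Int :=
  let v := i.getD j 0
  let max_left := max v st.2.1                                   -- max_left = max(i[j], max_left)
  let buttom := if v ≠ 0 then st.1 + 1 else st.1                 -- if i[j]: buttom += 1
  let max_front := if st.2.2.getD j 0 < v then st.2.2.set j v else st.2.2   -- if i[j] > max_front[j]
  (buttom, max_left, max_front)

-- outer loop body: state (buttom, left, max_front)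
def outerStep (st : Int × Int × List Int) (i : List Int) : Int × Int × List Int :=
  let inner := (List.range i.length).foldl (innerStep i) (st.1, 0, st.2.2)
  (inner.1, st.2.1 + inner.2.1, inner.2.2)

def projectionArea_1 (grid : List (List Int)) : Int :=
  let s := grid.foldl outerStep (0, 0, List.replicate (grid.headD []).length (0 : Int))
  s.2.1 + s.1 + s.2.2.sum

-- ===== PORT B =====
def projectionArea_1_alt (grid : List (List Int)) : Int :=
  let top := (grid.map (fun row => ((row.filter (fun v => v ≠ 0)).length : Int))).sum
  let side := (grid.map (fun row =>
      if row.isEmpty then (0 : Int)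
      else max ((PySem.List.max? row (fun y => y)).getD 0) 0)).sum
  let width := (grid.map (fun row => row.length)).foldl max 0
  let front := ((List.range width).map (fun j =>
      (PySem.List.max? ((0 : Int) :: grid.filterMap (fun row => row[j]?)) (fun y => y)).getD 0)).sum
  top + side + front

-- ===== PRECONDITION & SPEC =====
-- Pre_ excludes exactly the inputs where the Python A raises: the empty grid (grid[0] → IndexError)
-- and grids with a row longer than the first row (max_front[j] → IndexError).
def Pre_projectionArea_1 (grid : List (List Int)) : Prop :=
  grid ≠ [] ∧ ∀ row ∈ grid, row.length ≤ (grid.headD []).length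
instance (grid : List (List Int)) : Decidable (Pre_projectionArea_1 grid) := by
  unfold Pre_projectionArea_1; infer_instance
def pvWitness_projectionArea_1 : List (List Int) := [[1, 2], [0, 3]]

def Spec_projectionArea_1 (grid : List (List Int)) (out : Int) : Prop := out = projectionArea_1_alt grid
instance (grid : List (List Int)) (out : Int) : Decidable (Spec_projectionArea_1 grid out) := by unfold Spec_projectionArea_1; infer_instance

-- ===== CLAIM (what is proved, stated in full; the proofs are below) =====
def Claim_equal_projectionArea_1 : Prop := ∀ (grid : List (List Int)), Dom_projectionArea_1 grid → Pre_projectionArea_1 grid → Spec_projectionArea_1 grid (projectionArea_1 grid)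

-- ===== LEMMAS AND PROOFS =====

-- proof-side helpers
def cnt (row : List Int) : Int := ((row.filter (fun v => v ≠ 0)).length : Int)
def rowSide (row : List Int) : Int := row.foldl (fun a v => max v a) 0
def upd : List Int → List Int → List Int
  | mf, [] => mf
  | [], _ :: _ => []
  | m :: ms, v :: vs => max m v :: upd ms vs

lemma upd_length : ∀ (mf row : List Int), (upd mf row).length = mf.length := by
  intro mf row
  induction mf generalizing row with
  | nil => cases row <;> simp [upd]
  | cons m ms ih => cases row <;> simp [upd, ih]

lemma upd_getD (mf row : List Int) (j : Nat) (hj : j < mf.length) :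
    (upd mf row).getD j 0 = if j < row.length then max (mf.getD j 0) (row.getD j 0) else mf.getD j 0 := by
  induction mf generalizing row j with
  | nil => simp at hj
  | cons m ms ih =>
    cases row with
    | nil => simp [upd]
    | cons v vs =>
      cases j with
      | zero => simp [upd]
      | succ j =>
        simp only [upd, List.getD_cons_succ, List.length_cons, Nat.add_lt_add_iff_right]
        exact ih vs j (by simpa using hj)

lemma rangeFold_cons {α : Type} (f : α → Nat → α) (init : α) (n : Nat) :
    (List.range (n + 1)).foldl f init = (List.range n).foldl (fun s j => f s (j + 1)) (f init 0) := by
  rw [List.range_succ_eq_map]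
  simp [List.foldl_map]

lemma inner_shift (i : List Int) (v h0 : Int) (n : Nat) :
    ∀ (b ml : Int) (ms : List Int),
      (List.range n).foldl (fun st j => innerStep (v :: i) st (j + 1)) (b, ml, h0 :: ms)
        = (fun r : Int × Int × List Int => (r.1, r.2.1, h0 :: r.2.2))
            ((List.range n).foldl (innerStep i) (b, ml, ms)) := by
  induction n with
  | zero => intro b ml ms; simp
  | succ n ih =>
    intro b ml ms
    rw [List.range_succ, List.foldl_append, List.foldl_append, ih]
    rcases h : (List.range n).foldl (innerStep i) (b, ml, ms) with ⟨b2, ml2, ms2⟩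
    simp only [List.foldl_cons, List.foldl_nil, innerStep, List.getD_cons_succ, List.set_cons_succ]
    split <;> split <;> rfl

lemma inner_shift_nil (i : List Int) (v : Int) (n : Nat) :
    ∀ (b ml : Int),
      (List.range n).foldl (fun st j => innerStep (v :: i) st (j + 1)) (b, ml, ([] : List Int))
        = (fun r : Int × Int × List Int => (r.1, r.2.1, ([] : List Int)))
            ((List.range n).foldl (innerStep i) (b, ml, ([] : List Int))) := by
  induction n with
  | zero => intro b ml; simp
  | succ n ih =>
    intro b ml
    rw [List.range_succ, List.foldl_append, List.foldl_append, ih]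
    rcases h : (List.range n).foldl (innerStep i) (b, ml, ([] : List Int)) with ⟨b2, ml2, ms2⟩
    simp only [List.foldl_cons, List.foldl_nil, innerStep, List.getD_cons_succ, List.getD_nil, List.set_nil]
    split <;> split <;> rfl

lemma cnt_cons (v : Int) (vs : List Int) : cnt (v :: vs) = (if v ≠ 0 then 1 else 0) + cnt vs := by
  rcases eq_or_ne v 0 with h | h
  · simp [cnt, h]
  · simp [cnt, h]
    push_cast
    ring

lemma inner_fold (i : List Int) : ∀ (mf : List Int) (b ml : Int),
    (List.range i.length).foldl (innerStep i) (b, ml, mf)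
      = (b + cnt i, i.foldl (fun a v => max v a) ml, upd mf i) := by
  induction i with
  | nil => intro mf b ml; simp [cnt, upd]
  | cons v vs ih =>
    intro mf b ml
    rw [List.length_cons, rangeFold_cons]
    have h0 : innerStep (v :: vs) (b, ml, mf) 0
        = (if v ≠ 0 then b + 1 else b, max v ml,
           match mf with
           | [] => ([] : List Int)
           | m :: ms => max m v :: ms) := by
      cases mf with
      | nil => simp [innerStep]
      | cons m ms =>
        simp only [innerStep, List.getD_cons_zero, List.set_cons_zero]
        by_cases h : m < v
        · simp [h, max_eq_right (le_of_lt h)]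
        · simp [h, max_eq_left (le_of_not_gt h)]
    rw [h0]
    cases mf with
    | nil =>
      rw [inner_shift_nil vs v, ih]
      simp only [List.foldl_cons, cnt_cons, upd, Prod.mk.injEq]
      exact ⟨by split_ifs <;> ring, trivial⟩
    | cons m ms =>
      rw [inner_shift, ih]
      simp only [List.foldl_cons, cnt_cons, upd, Prod.mk.injEq]
      exact ⟨by split_ifs <;> ring, trivial⟩

lemma outer_fold (g : List (List Int)) : ∀ (mf : List Int) (b l : Int),
    g.foldl outerStep (b, l, mf)
      = (b + (g.map cnt).sum, l + (g.map rowSide).sum, g.foldl upd mf) := by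
  induction g with
  | nil => intro mf b l; simp
  | cons i g ih =>
    intro mf b l
    have hstep : outerStep (b, l, mf) i = (b + cnt i, l + rowSide i, upd mf i) := by
      simp only [outerStep, inner_fold]; rfl
    simp only [List.foldl_cons, hstep, ih, List.map_cons, List.sum_cons, Prod.mk.injEq]
    exact ⟨by ring, by ring, trivial⟩

lemma foldl_max_comm (vs : List Int) : ∀ a : Int, vs.foldl (fun a v => max v a) a = vs.foldl max a := by
  induction vs with
  | nil => intro a; rfl
  | cons v vs ih => intro a; simp only [List.foldl_cons, max_comm v a, ih]

lemma foldl_max_out (vs : List Int) : ∀ a c : Int, vs.foldl max (max a c) = max (vs.foldl max a) c := by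
  induction vs with
  | nil => intro a c; rfl
  | cons v vs ih =>
    intro a c
    simp only [List.foldl_cons]
    rw [show max (max a c) v = max (max a v) c by rw [max_right_comm], ih]

lemma side_eq (row : List Int) :
    (if row.isEmpty then (0 : Int) else max ((PySem.List.max? row (fun y => y)).getD 0) 0) = rowSide row := by
  cases row with
  | nil => rfl
  | cons v vs =>
    simp only [List.isEmpty_cons, Bool.false_eq_true, if_false, PySem.List.max?_id_cons,
      Option.getD_some, rowSide, List.foldl_cons]
    rw [foldl_max_comm, foldl_max_out]

lemma foldl_nat_max_fix (l : List Nat) : ∀ a : Nat, (∀ x ∈ l, x ≤ a) → l.foldl max a = a := by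
  induction l with
  | nil => intro a _; rfl
  | cons x l ih =>
    intro a h
    simp only [List.foldl_cons, max_eq_left (h x (by simp))]
    exact ih a fun y hy => h y (by simp [hy])

lemma sum_eq_range (L : List Int) :
    L.sum = ((List.range L.length).map (fun j => L.getD j 0)).sum := by
  induction L with
  | nil => rfl
  | cons a L ih =>
    simp only [List.sum_cons, List.length_cons, List.range_succ_eq_map, List.map_cons,
      List.getD_cons_zero, List.map_map, List.sum_cons]
    rw [ih]
    congr 1

lemma foldl_upd_length (g : List (List Int)) : ∀ mf : List Int, (g.foldl upd mf).length = mf.length := by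
  induction g with
  | nil => intro mf; rfl
  | cons r g ih => intro mf; simp only [List.foldl_cons, ih, upd_length]

lemma foldl_upd_getD (g : List (List Int)) : ∀ (mf : List Int) (j : Nat), j < mf.length →
    (g.foldl upd mf).getD j 0 = (g.filterMap (fun row => row[j]?)).foldl max (mf.getD j 0) := by
  induction g with
  | nil => intro mf j _; rfl
  | cons r g ih =>
    intro mf j hj
    simp only [List.foldl_cons, List.filterMap_cons]
    rw [ih (upd mf r) j (by rw [upd_length]; exact hj), upd_getD mf r j hj]
    by_cases hr : j < r.length
    · rw [List.getElem?_eq_getElem hr]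
      simp only [if_pos hr, List.foldl_cons]
      rw [List.getD_eq_getElem r 0 hr]
    · rw [List.getElem?_eq_none (Nat.le_of_not_lt hr)]
      simp [if_neg hr]

-- ===== VERDICT (by name: the statement is the Claim_ definition above) =====
theorem projectionArea_1_spec : Claim_equal_projectionArea_1 := by
  intro grid _ hpre
  obtain ⟨hne, hrows⟩ := hpre
  unfold Spec_projectionArea_1 projectionArea_1 projectionArea_1_alt
  dsimp only
  rw [outer_fold]
  obtain ⟨g0, gs, rfl⟩ : ∃ g0 gs, grid = g0 :: gs := by
    cases grid with
    | nil => exact absurd rfl hne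
    | cons g0 gs => exact ⟨g0, gs, rfl⟩
  have hhead : ((g0 :: gs).headD []).length = g0.length := rfl
  -- width = length of the first row
  have hwidth : (((g0 :: gs).map (fun row => row.length)).foldl max 0) = g0.length := by
    simp only [List.map_cons, List.foldl_cons, Nat.zero_max]
    exact foldl_nat_max_fix _ _ (by
      intro x hx
      obtain ⟨row, hr, rfl⟩ := List.mem_map.mp hx
      exact hrows row (List.mem_cons_of_mem _ hr))
  rw [hwidth]
  -- top = buttom
  have htop : ((g0 :: gs).map cnt).sum
      = ((g0 :: gs).map (fun row => ((row.filter (fun v => v ≠ 0)).length : Int))).sum := rfl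
  -- side = left
  have hside : ((g0 :: gs).map rowSide).sum
      = ((g0 :: gs).map (fun row =>
          if row.isEmpty then (0 : Int)
          else max ((PySem.List.max? row (fun y => y)).getD 0) 0)).sum := by
    congr 1
    exact (List.map_congr_left fun row _ => side_eq row).symm
  -- front = sum of column maxima
  have hmf : ((g0 :: gs).foldl upd (List.replicate (((g0 :: gs).headD []).length) (0 : Int))).sum
      = ((List.range g0.length).map (fun j =>
          (PySem.List.max? ((0 : Int) :: (g0 :: gs).filterMap (fun row => row[j]?)) (fun y => y)).getD 0)).sum := by
    rw [sum_eq_range, foldl_upd_length, hhead, List.length_replicate]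
    refine congrArg List.sum (List.map_congr_left fun j hj => ?_)
    have hjw : j < g0.length := List.mem_range.mp hj
    rw [foldl_upd_getD _ _ j (by simpa using hjw), PySem.List.max?_id_cons, Option.getD_some,
      List.getD_replicate]
    exact hjw
  simp only [hhead] at hmf ⊢
  rw [hmf, ← htop, ← hside]
  ring
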